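-- pv_equiv track=rewrite | github.com/cjkuhlmann/SUSF-Rover | controlstate.py | cut_and_order
-- ===== SOURCE A (Python) =====
-- def cut_and_order(input_list):
--     output_list = []
--     if len(input_list) <= 2:
--         return input_list
--
--     middle = int(len(input_list)/2)
--     left_list = input_list[:middle]
--     right_list = input_list[middle+1:]
--
--     middle = [input_list[middle]]
--
--     output_list += cut_and_order(left_list)
--     output_list += cut_and_order(right_list)
--
--     return middle+output_list
-- ===== SOURCE B (Python) =====
-- def cut_and_order(input_list):
--     output_list = []
--     stack = [(0, len(input_list))]
--     while stack:
--         lo, hi = stack.pop()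
--         if hi - lo <= 2:
--             output_list.extend(input_list[lo:hi])
--         else:
--             mid = lo + (hi - lo) // 2
--             output_list.append(input_list[mid])
--             stack.append((mid + 1, hi))
--             stack.append((lo, mid))
--     return output_list
-- ===== Notes on version B (the rewrite author's own statement) =====
-- stated objective: alternative
-- what changed: Replaced the recursive midpoint splitting (which slices the list into fresh sublists at every level) by an iterative loop over an explicit stack of (lo, hi) index ranges into the original list, emitting elements into one output accumulator.
import Mathlib
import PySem

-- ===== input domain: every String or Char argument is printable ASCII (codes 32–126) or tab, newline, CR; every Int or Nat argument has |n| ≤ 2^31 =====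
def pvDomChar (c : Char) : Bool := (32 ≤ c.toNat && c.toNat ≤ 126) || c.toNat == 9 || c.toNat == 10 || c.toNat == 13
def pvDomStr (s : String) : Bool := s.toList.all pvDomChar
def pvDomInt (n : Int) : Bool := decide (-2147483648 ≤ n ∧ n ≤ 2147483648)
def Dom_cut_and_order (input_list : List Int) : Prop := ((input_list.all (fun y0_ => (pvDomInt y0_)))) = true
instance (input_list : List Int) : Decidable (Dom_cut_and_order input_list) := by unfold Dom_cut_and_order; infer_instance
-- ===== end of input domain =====

-- B replaces A's recursive midpoint slicing by an iterative loop over an explicit stack of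
-- (lo, hi) index ranges into the original list (alternative decomposition, same output).

-- ===== PORT A =====
-- int(len(l)/2) = len // 2 exactly for the list lengths at hand; ports as Nat division.
-- input_list[middle] always exists here (middle < length since length ≥ 3); the Option
-- from pyGet? is eliminated to the singleton Python builds.
def cut_and_order (input_list : List Int) : List Int :=
  if _h : input_list.length ≤ 2 then input_list
  else
    let middle : Nat := input_list.length / 2
    let left_list := PySem.List.slice input_list none (some (middle : Int))
    let right_list := PySem.List.slice input_list (some ((middle : Int) + 1)) none
    let mid := (PySem.List.pyGet? input_list (middle : Int)).elim [] (fun x => [x])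
    mid ++ (cut_and_order left_list ++ cut_and_order right_list)
termination_by input_list.length
decreasing_by
  · rw [PySem.List.slice_to input_list (Int.natCast_nonneg _)]
    simp only [Int.toNat_natCast, List.length_take]; omega
  · rw [PySem.List.slice_from input_list
      (a := ((input_list.length / 2 : Nat) : Int) + 1) (by positivity)]
    simp only [List.length_drop]; omega

-- ===== PORT B =====
-- the while-loop over the explicit stack; input_list[lo:hi] with 0 ≤ lo ≤ hi is drop/take,
-- input_list[mid] (always in range in B) via pyGet? eliminated to the appended singleton.
def cutLoop (l : List Int) : List (Nat × Nat) → List Int → List Int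
  | [], output_list => output_list
  | (lo, hi) :: stack, output_list =>
    if hi - lo ≤ 2 then
      cutLoop l stack (output_list ++ (l.drop lo).take (hi - lo))
    else
      let mid := lo + (hi - lo) / 2
      cutLoop l ((lo, mid) :: (mid + 1, hi) :: stack)
        (output_list ++ (PySem.List.pyGet? l (mid : Int)).elim [] (fun x => [x]))
termination_by s _ => 2 * (s.map (fun p => p.2 - p.1)).sum + s.length
decreasing_by all_goals simp only [List.map_cons, List.sum_cons, List.length_cons]; omega

def cut_and_order_alt (input_list : List Int) : List Int :=
  cutLoop input_list [(0, input_list.length)] []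

-- ===== PRECONDITION & SPEC =====
def Spec_cut_and_order (input_list : List Int) (out : List Int) : Prop := out = cut_and_order_alt input_list
instance (input_list : List Int) (out : List Int) : Decidable (Spec_cut_and_order input_list out) := by unfold Spec_cut_and_order; infer_instance

-- ===== CLAIM (what is proved, stated in full; the proofs are below) =====
def Claim_equal_cut_and_order : Prop := ∀ (input_list : List Int), Dom_cut_and_order input_list → Spec_cut_and_order input_list (cut_and_order input_list)

-- ===== LEMMAS AND PROOFS =====

-- the segment of l covered by the range (lo, hi)
def seg (l : List Int) (lo hi : Nat) : List Int := (l.drop lo).take (hi - lo)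

theorem seg_length (l : List Int) {lo hi : Nat} (hhi : hi ≤ l.length) :
    (seg l lo hi).length = hi - lo := by
  simp [seg]; omega

-- A on a segment, re-expressed over the indices (the recursive case)
theorem seg_take (l : List Int) {lo hi : Nat} (m : Nat) (hm : m ≤ hi - lo) :
    (seg l lo hi).take m = seg l lo (lo + m) := by
  simp only [seg, List.take_take]
  congr 1
  omega

theorem seg_drop (l : List Int) (lo hi m : Nat) :
    (seg l lo hi).drop m = seg l (lo + m) hi := by
  simp only [seg, List.drop_take, List.drop_drop]
  congr 1
  omega

theorem seg_get (l : List Int) {lo hi m : Nat} (hm : m < hi - lo) (hhi : hi ≤ l.length) :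
    (seg l lo hi)[m]? = l[lo + m]? := by
  have h1 : m < (seg l lo hi).length := by rw [seg_length l hhi]; omega
  have h2 : lo + m < l.length := by omega
  rw [List.getElem?_eq_getElem h1, List.getElem?_eq_getElem h2]
  simp only [seg, List.getElem_take, List.getElem_drop]

theorem cut_seg (l : List Int) {lo hi : Nat} (_hlo : lo ≤ hi) (hhi : hi ≤ l.length)
    (h : ¬ hi - lo ≤ 2) :
    cut_and_order (seg l lo hi) =
      (PySem.List.pyGet? l ((lo + (hi - lo) / 2 : Nat) : Int)).elim [] (fun x => [x]) ++
      (cut_and_order (seg l lo (lo + (hi - lo) / 2)) ++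
       cut_and_order (seg l (lo + (hi - lo) / 2 + 1) hi)) := by
  have hlen : (seg l lo hi).length = hi - lo := seg_length l hhi
  rw [cut_and_order]
  rw [dif_neg (by rw [hlen]; exact h)]
  simp only [hlen]
  rw [PySem.List.slice_to _ (Int.natCast_nonneg _),
    PySem.List.slice_from _ (a := (((hi - lo) / 2 : Nat) : Int) + 1) (by positivity)]
  have hcast : (((hi - lo) / 2 : Nat) : Int) + 1 = (((hi - lo) / 2 + 1 : Nat) : Int) := by
    push_cast; ring
  rw [hcast, Int.toNat_natCast, Int.toNat_natCast, PySem.List.pyGet?_natCast,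
    PySem.List.pyGet?_natCast, seg_take l _ (by omega), seg_drop,
    seg_get l (by omega) hhi]
  have hassoc : lo + ((hi - lo) / 2 + 1) = lo + (hi - lo) / 2 + 1 := by omega
  rw [hassoc]

theorem cut_seg_base (l : List Int) {lo hi : Nat} (hhi : hi ≤ l.length)
    (h : hi - lo ≤ 2) : cut_and_order (seg l lo hi) = seg l lo hi := by
  rw [cut_and_order]
  simp [seg_length l hhi, h]

-- loop invariant: the loop appends, range by range, A's value on each segment
theorem cutLoop_spec (l : List Int) (s : List (Nat × Nat)) (out : List Int)
    (hs : ∀ p ∈ s, p.1 ≤ p.2 ∧ p.2 ≤ l.length) :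
    cutLoop l s out = out ++ (s.map (fun p => cut_and_order (seg l p.1 p.2))).flatten := by
  fun_induction cutLoop l s out with
  | case1 out => simp
  | case2 lo hi stack out hbase ih =>
    obtain ⟨h1, h2⟩ := hs (lo, hi) (by simp)
    rw [ih (fun p hp => hs p (by simp [hp]))]
    rw [List.map_cons, List.flatten_cons, cut_seg_base l h2 hbase]
    simp [seg, List.append_assoc]
  | case3 lo hi stack out hbase mid ih =>
    have hmv : mid = lo + (hi - lo) / 2 := rfl
    obtain ⟨h1, h2⟩ := hs (lo, hi) (by simp)
    simp only at h1 h2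
    have hs' : ∀ p ∈ (lo, mid) :: (mid + 1, hi) :: stack, p.1 ≤ p.2 ∧ p.2 ≤ l.length := by
      intro p hp
      simp only [List.mem_cons] at hp
      rcases hp with hh | hh | hh
      · subst hh; constructor <;> simp <;> omega
      · subst hh; constructor <;> simp <;> omega
      · exact hs p (by simp [hh])
    rw [ih hs', hmv]
    simp only [List.map_cons, List.flatten_cons]
    rw [cut_seg l h1 h2 hbase]
    simp [List.append_assoc]

-- ===== VERDICT (by name: the statement is the Claim_ definition above) =====
theorem cut_and_order_spec : Claim_equal_cut_and_order := by
  intro l _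
  show cut_and_order l = cut_and_order_alt l
  rw [cut_and_order_alt, cutLoop_spec l _ _ (by simp)]
  simp [seg]
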